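-- pv_equiv track=rewrite | github.com/MitchellQuinn/bounded-monocular-perception | scripts/analyze_brightness_run.py | _effect_label
-- ===== SOURCE A (Python) =====
-- def _effect_label(signals: list[int]) -> str:
--     usable = [signal for signal in signals if signal != 0]
--     if not usable:
--         return "mixed"
--     if all(signal > 0 for signal in usable):
--         return "help"
--     if all(signal < 0 for signal in usable):
--         return "hurt"
--     return "mixed"
-- ===== SOURCE B (Python) =====
-- def _effect_label(signals: list[int]) -> str:
--     lo = min(signals, default=0)
--     hi = max(signals, default=0)
--     if hi > 0 and lo >= 0:
--         return "help"
--     if lo < 0 and hi <= 0: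
--         return "hurt"
--     return "mixed"
-- ===== Notes on version B (the rewrite author's own statement) =====
-- stated objective: alternative
-- what changed: Classifies by the list's extremes (min/max with default 0) instead of filtering zeros and running two all() passes: hi>0 and lo>=0 means help, lo<0 and hi<=0 means hurt, else mixed.
import Mathlib
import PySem

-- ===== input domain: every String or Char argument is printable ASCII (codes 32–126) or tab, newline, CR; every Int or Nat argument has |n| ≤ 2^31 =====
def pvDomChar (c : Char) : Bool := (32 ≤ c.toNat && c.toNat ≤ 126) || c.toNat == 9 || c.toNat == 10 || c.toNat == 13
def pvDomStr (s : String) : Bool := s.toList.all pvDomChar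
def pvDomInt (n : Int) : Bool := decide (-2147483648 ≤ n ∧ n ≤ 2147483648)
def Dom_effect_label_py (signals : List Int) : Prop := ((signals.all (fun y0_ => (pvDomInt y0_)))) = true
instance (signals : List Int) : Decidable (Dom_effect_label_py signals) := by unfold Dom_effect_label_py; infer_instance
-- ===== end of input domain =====

-- B classifies by the extremes min/max (default 0) instead of filtering zeros and running two all() passes; alternative, same cost.
-- ===== PORT A =====
def effect_label_py (signals : List Int) : String :=
  let usable := signals.filter (fun signal => signal != 0)
  if usable = [] then "mixed"
  else if usable.all (fun signal => decide (signal > 0)) then "help"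
  else if usable.all (fun signal => decide (signal < 0)) then "hurt"
  else "mixed"

-- ===== PORT B =====
def effect_label_py_alt (signals : List Int) : String :=
  let lo := (PySem.List.min? signals (fun x => x)).getD 0
  let hi := (PySem.List.max? signals (fun x => x)).getD 0
  if hi > 0 ∧ lo ≥ 0 then "help"
  else if lo < 0 ∧ hi ≤ 0 then "hurt"
  else "mixed"

-- ===== PRECONDITION & SPEC =====
def Spec_effect_label_py (signals : List Int) (out : String) : Prop := out = effect_label_py_alt signals
instance (signals : List Int) (out : String) : Decidable (Spec_effect_label_py signals out) := by unfold Spec_effect_label_py; infer_instance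

-- ===== CLAIM (what is proved, stated in full; the proofs are below) =====
def Claim_equal_effect_label_py : Prop := ∀ (signals : List Int), Dom_effect_label_py signals → Spec_effect_label_py signals (effect_label_py signals)

-- ===== LEMMAS AND PROOFS =====

lemma hi_pos_iff (signals : List Int) :
    (0 < ((PySem.List.max? signals (fun x => x)).getD 0)) ↔ ∃ s ∈ signals, 0 < s := by
  rcases h : PySem.List.max? signals (fun x => x) with _ | m
  · have := PySem.List.max?_eq_none_iff (xs := signals) (key := fun x => x) |>.mp h
    subst this; simp
  · have hmem := PySem.List.max?_mem h
    have hmax := PySem.List.max?_isMax h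
    simp only [Option.getD_some]
    constructor
    · intro hp; exact ⟨m, hmem, hp⟩
    · rintro ⟨s, hs, hsp⟩; exact lt_of_lt_of_le hsp (hmax s hs)

lemma lo_neg_iff (signals : List Int) :
    (((PySem.List.min? signals (fun x => x)).getD 0) < 0) ↔ ∃ s ∈ signals, s < 0 := by
  rcases h : PySem.List.min? signals (fun x => x) with _ | m
  · have := PySem.List.min?_eq_none_iff (xs := signals) (key := fun x => x) |>.mp h
    subst this; simp
  · have hmem := PySem.List.min?_mem h
    have hmin := PySem.List.min?_isMin h
    simp only [Option.getD_some]
    constructor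
    · intro hp; exact ⟨m, hmem, hp⟩
    · rintro ⟨s, hs, hsp⟩; exact lt_of_le_of_lt (hmin s hs) hsp

-- ===== VERDICT (by name: the statement is the Claim_ definition above) =====
theorem effect_label_py_spec : Claim_equal_effect_label_py := by
  intro signals _
  unfold Spec_effect_label_py effect_label_py effect_label_py_alt
  simp only []
  set lo := (PySem.List.min? signals (fun x => x)).getD 0 with hlo
  set hi := (PySem.List.max? signals (fun x => x)).getD 0 with hhi
  have hP : (0 < hi) ↔ ∃ s ∈ signals, 0 < s := hi_pos_iff signals
  have hN : (lo < 0) ↔ ∃ s ∈ signals, s < 0 := lo_neg_iff signals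
  set l := signals.filter (fun s => s != 0) with hl
  have hempty : l = [] ↔ (¬ ∃ s ∈ signals, 0 < s) ∧ (¬ ∃ s ∈ signals, s < 0) := by
    rw [hl, List.filter_eq_nil_iff]
    constructor
    · intro h
      constructor <;> rintro ⟨s, hs, hsp⟩ <;> have := h s hs <;> simp at this <;> omega
    · rintro ⟨h1, h2⟩ s hs
      simp only [bne_iff_ne, ne_eq, Decidable.not_not]
      by_contra hne
      rcases lt_or_gt_of_ne (by simpa using hne : s ≠ 0) with h | h
      · exact h2 ⟨s, hs, h⟩
      · exact h1 ⟨s, hs, h⟩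
  have hallpos : (l.all (fun signal => decide (signal > 0)) = true) ↔ ¬ ∃ s ∈ signals, s < 0 := by
    rw [hl]
    simp only [List.all_eq_true, List.mem_filter, bne_iff_ne, ne_eq, decide_eq_true_eq]
    constructor
    · rintro h ⟨s, hs, hsn⟩
      have := h s ⟨hs, by omega⟩; omega
    · intro h s ⟨hs, hne⟩
      by_contra hle
      exact h ⟨s, hs, by omega⟩
  have hallneg : (l.all (fun signal => decide (signal < 0)) = true) ↔ ¬ ∃ s ∈ signals, 0 < s := by
    rw [hl]
    simp only [List.all_eq_true, List.mem_filter, bne_iff_ne, ne_eq, decide_eq_true_eq]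
    constructor
    · rintro h ⟨s, hs, hsn⟩
      have := h s ⟨hs, by omega⟩; omega
    · intro h s ⟨hs, hne⟩
      by_contra hle
      exact h ⟨s, hs, by omega⟩
  by_cases P : ∃ s ∈ signals, 0 < s <;> by_cases N : ∃ s ∈ signals, s < 0
  · -- mixed both sides
    have h1 : l ≠ [] := fun h => (hempty.mp h).1 P
    have h2 : ¬ (l.all (fun signal => decide (signal > 0)) = true) := fun h => (hallpos.mp h) N
    have h3 : ¬ (l.all (fun signal => decide (signal < 0)) = true) := fun h => (hallneg.mp h) P
    have b1 : ¬ (0 < hi ∧ 0 ≤ lo) := fun ⟨_, hle⟩ => absurd (hN.mpr N) (by omega)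
    have b2 : ¬ (lo < 0 ∧ hi ≤ 0) := by intro ⟨_, hle⟩; exact absurd (hP.mpr P) (by omega)
    simp [h1, h2, h3, b1, b2]
  · -- help
    have h1 : l ≠ [] := fun h => (hempty.mp h).1 P
    have h2 : l.all (fun signal => decide (signal > 0)) = true := hallpos.mpr N
    have b1 : 0 < hi ∧ 0 ≤ lo := ⟨hP.mpr P, by have := hN.not.mpr N; omega⟩
    simp [h1, h2, b1]
  · -- hurt
    have h1 : l ≠ [] := fun h => (hempty.mp h).2 N
    have h2 : ¬ (l.all (fun signal => decide (signal > 0)) = true) := fun h => (hallpos.mp h) N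
    have h3 : l.all (fun signal => decide (signal < 0)) = true := hallneg.mpr P
    have b1 : ¬ (0 < hi ∧ 0 ≤ lo) := by intro ⟨h, _⟩; exact P (hP.mp h)
    have b2 : lo < 0 ∧ hi ≤ 0 := ⟨hN.mpr N, by have := hP.not.mpr P; omega⟩
    simp [h1, h2, h3, b1, b2]
  · -- empty/all-zero: mixed
    have h1 : l = [] := hempty.mpr ⟨P, N⟩
    have b1 : ¬ (0 < hi ∧ 0 ≤ lo) := by intro ⟨h, _⟩; exact P (hP.mp h)
    have b2 : ¬ (lo < 0 ∧ hi ≤ 0) := by intro ⟨h, _⟩; exact N (hN.mp h)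
    simp [h1, b1, b2]
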